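-- pv_equiv track=rewrite | github.com/vidyasagar06K/Encoding_Decoding_tool | Encoding_Decoding tool.py | dm_decode
-- ===== SOURCE A (Python) =====
-- def dm_decode(encoded_data):
--     analog_signal = [0]
--     for bit in encoded_data:
--         if bit == 1:
--             analog_signal.append(analog_signal[-1] + 1)
--         else:
--             analog_signal.append(analog_signal[-1] - 1)
--     return analog_signal
-- ===== SOURCE B (Python) =====
-- def dm_decode(encoded_data):
--     # Back-to-front construction: compute the final level first, then walk the
--     # bits in reverse, recording the level reached *after* each bit and undoing
--     # that bit's step; append the starting level (always 0) and reverse.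
--     level = sum(1 if b == 1 else -1 for b in encoded_data)
--     out = []
--     for bit in reversed(encoded_data):
--         out.append(level)
--         level -= 1 if bit == 1 else -1
--     out.append(level)
--     out.reverse()
--     return out
-- ===== Notes on version B (the rewrite author's own statement) =====
-- stated objective: alternative
-- what changed: A builds the signal front-to-back by appending last+/-1 each step; B constructs it back-to-front: it first sums all +/-1 deltas to get the final level, then traverses the bits in reverse, emitting each intermediate level by subtracting deltas, and reverses the collected list.
import Mathlib
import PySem

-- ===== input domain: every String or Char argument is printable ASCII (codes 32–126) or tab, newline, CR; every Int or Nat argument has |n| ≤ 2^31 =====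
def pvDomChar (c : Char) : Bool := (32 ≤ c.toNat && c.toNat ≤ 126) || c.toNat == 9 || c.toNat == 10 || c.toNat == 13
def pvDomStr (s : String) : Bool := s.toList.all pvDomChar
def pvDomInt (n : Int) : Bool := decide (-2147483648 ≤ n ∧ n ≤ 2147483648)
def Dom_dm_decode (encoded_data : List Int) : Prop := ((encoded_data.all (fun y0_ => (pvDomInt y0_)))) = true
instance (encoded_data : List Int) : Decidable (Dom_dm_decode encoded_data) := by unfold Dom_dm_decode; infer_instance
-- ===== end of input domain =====

-- B builds the signal back-to-front (total level first, then reverse walk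
-- subtracting deltas, then reverse) instead of A's forward append loop;
-- alternative decomposition, same cost.


-- ===== PORT A =====
-- analog_signal starts [0]; each bit appends last+1 or last-1
-- (analog_signal[-1] ported as getLastD; the list is never empty)
def dm_decode (encoded_data : List Int) : List Int :=
  encoded_data.foldl
    (fun analog_signal bit =>
      if bit == 1 then analog_signal ++ [analog_signal.getLastD 0 + 1]
      else analog_signal ++ [analog_signal.getLastD 0 - 1])
    [0]

-- ===== PORT B =====
-- the step delta of one bit (the '1 if b == 1 else -1' expression)
def pvDelta (b : Int) : Int := if b == 1 then 1 else -1

-- level = sum(deltas); loop over reversed(encoded_data) appending the level and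
-- undoing the delta; append the final level; reverse.
def dm_decode_alt (encoded_data : List Int) : List Int :=
  let level := (encoded_data.map pvDelta).sum
  let st := encoded_data.reverse.foldl
    (fun (st : List Int × Int) bit => (st.1 ++ [st.2], st.2 - pvDelta bit))
    ([], level)
  (st.1 ++ [st.2]).reverse

-- ===== PRECONDITION & SPEC =====
def Spec_dm_decode (encoded_data : List Int) (out : List Int) : Prop := out = dm_decode_alt encoded_data
instance (encoded_data : List Int) (out : List Int) : Decidable (Spec_dm_decode encoded_data out) := by unfold Spec_dm_decode; infer_instance

-- ===== CLAIM (what is proved, stated in full; the proofs are below) =====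
def Claim_equal_dm_decode : Prop := ∀ (encoded_data : List Int), Dom_dm_decode encoded_data → Spec_dm_decode encoded_data (dm_decode encoded_data)

-- ===== LEMMAS AND PROOFS =====

-- forward scan of deltas from level v (characterises A)
def pvScan (v : Int) : List Int → List Int
  | [] => []
  | d :: ds => (v + d) :: pvScan (v + d) ds

-- downward walk: levels emitted by B's reverse loop starting at v over deltas ds
def pvDown (v : Int) : List Int → List Int
  | [] => []
  | d :: ds => v :: pvDown (v - d) ds

theorem pvScan_a (bits : List Int) : ∀ (acc : List Int) (v : Int), acc.getLast? = some v →
    bits.foldl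
      (fun analog_signal bit =>
        if bit == 1 then analog_signal ++ [analog_signal.getLastD 0 + 1]
        else analog_signal ++ [analog_signal.getLastD 0 - 1])
      acc
    = acc ++ pvScan v (bits.map pvDelta) := by
  induction bits with
  | nil => intro acc v _; simp [pvScan]
  | cons b bs ih =>
    intro acc v hlast
    have hD : acc.getLastD 0 = v := by rw [List.getLastD_eq_getLast?, hlast]; rfl
    simp only [List.foldl_cons, List.map_cons, hD]
    by_cases hb : b == 1
    · rw [if_pos hb, ih (acc ++ [v + 1]) (v + 1) List.getLast?_concat]
      simp [pvScan, pvDelta, hb]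
    · rw [if_neg hb, ih (acc ++ [v - 1]) (v - 1) List.getLast?_concat]
      simp [pvScan, pvDelta, hb, sub_eq_add_neg]

theorem pvDown_b (bits : List Int) : ∀ (acc : List Int) (v : Int),
    bits.foldl (fun (st : List Int × Int) bit => (st.1 ++ [st.2], st.2 - pvDelta bit)) (acc, v)
    = (acc ++ pvDown v (bits.map pvDelta), v - (bits.map pvDelta).sum) := by
  induction bits with
  | nil => intro acc v; simp [pvDown]
  | cons b bs ih =>
    intro acc v
    simp only [List.foldl_cons, List.map_cons, ih, List.append_assoc, List.sum_cons, pvDown]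
    simp only [Prod.mk.injEq]
    exact ⟨by simp, by ring⟩

theorem pvDown_append (xs ys : List Int) : ∀ (v : Int),
    pvDown v (xs ++ ys) = pvDown v xs ++ pvDown (v - xs.sum) ys := by
  induction xs with
  | nil => intro v; simp [pvDown]
  | cons x xs ih =>
    intro v
    simp only [List.cons_append, pvDown, List.sum_cons, ih]
    rw [show v - x - xs.sum = v - (x + xs.sum) by ring]

theorem pvDown_rev (ds : List Int) : ∀ (v : Int),
    (pvDown (v + ds.sum) ds.reverse).reverse = pvScan v ds := by
  induction ds with
  | nil => intro v; simp [pvDown, pvScan]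
  | cons d rest ih =>
    intro v
    rw [List.reverse_cons, pvDown_append, List.sum_reverse]
    simp only [List.sum_cons, pvDown, List.reverse_append]
    rw [show v + (d + rest.sum) - rest.sum = v + d by ring,
        show v + (d + rest.sum) = (v + d) + rest.sum by ring, ih]
    simp [pvScan]

-- ===== VERDICT (by name: the statement is the Claim_ definition above) =====
theorem dm_decode_spec : Claim_equal_dm_decode := by
  intro l _
  show dm_decode l = dm_decode_alt l
  unfold dm_decode dm_decode_alt
  dsimp only
  rw [pvScan_a l [0] 0 rfl, pvDown_b]
  simp only [List.map_reverse, List.sum_reverse]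
  have hsum : (l.map pvDelta).sum - (l.map pvDelta).sum = 0 := by ring
  rw [hsum, List.nil_append, List.reverse_append, List.reverse_cons, List.reverse_nil,
      List.nil_append]
  rw [show (l.map pvDelta).sum = 0 + (l.map pvDelta).sum by ring, pvDown_rev]
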